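-- pv_equiv track=rewrite | github.com/KamilDemel/LeetCode-Grind | WDI_Fundamentals/knight_attack_coverage.py | find_most_valuable_knight_to_remove
-- ===== SOURCE A (Python) =====
-- def find_most_valuable_knight_to_remove(knights_list, n):
--     """
--     Calculates which knight, if removed, would free up the most cells
--     that are currently only attacked/occupied by that single knight.
--     """
--     board = [[0] * n for _ in range(n)]
--
--     knight_moves = [
--         (1, 2), (2, 1), (2, -1), (-1, 2),
--         (-1, -2), (-2, -1), (-2, 1), (1, -2)
--     ]
--     for x, y in knights_list:
--         board[x][y] += 1
--         for dx, dy in knight_moves: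
--             nx, ny = x + dx, y + dy
--             if 0 <= nx < n and 0 <= ny < n:
--                 board[nx][ny] += 1
--
--     max_cells_freed = 0
--
--     for x, y in knights_list:
--         cells_freed_by_this_knight = 0
--
--         if board[x][y] == 1:
--             cells_freed_by_this_knight += 1
--
--         for dx, dy in knight_moves:
--             nx, ny = x + dx, y + dy
--             if 0 <= nx < n and 0 <= ny < n:
--                 if board[nx][ny] == 1:
--                     cells_freed_by_this_knight += 1
--
--         if cells_freed_by_this_knight > max_cells_freed:
--             max_cells_freed = cells_freed_by_this_knight
--
--     return max_cells_freed
-- ===== SOURCE B (Python) =====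
-- def find_most_valuable_knight_to_remove(knights_list, n):
--     # Same coverage pass as the original, but additionally record for each board
--     # cell the index of the last knight that incremented it; then a single sweep
--     # over the board credits every uniquely-covered cell to its sole owner,
--     # replacing the per-knight neighbour re-scan.
--     board = [[0] * n for _ in range(n)]
--     owner = [[-1] * n for _ in range(n)]
--
--     knight_moves = [
--         (1, 2), (2, 1), (2, -1), (-1, 2),
--         (-1, -2), (-2, -1), (-2, 1), (1, -2)
--     ]
--     for i, (x, y) in enumerate(knights_list):
--         board[x][y] += 1
--         owner[x][y] = i
--         for dx, dy in knight_moves: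
--             nx, ny = x + dx, y + dy
--             if 0 <= nx < n and 0 <= ny < n:
--                 board[nx][ny] += 1
--                 owner[nx][ny] = i
--
--     tally = [0] * len(knights_list)
--     for brow, orow in zip(board, owner):
--         for cnt, own in zip(brow, orow):
--             if cnt == 1:
--                 tally[own] += 1
--
--     return max(tally, default=0)
-- ===== Notes on version B (the rewrite author's own statement) =====
-- stated objective: alternative
-- what changed: B keeps the coverage-counting pass but also records each cell's last covering knight in an owner grid, then replaces A's per-knight neighbour re-scan by a single sweep over the board that credits every uniquely-covered cell to its sole owner, finishing with max(tally, default=0).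
import Mathlib
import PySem

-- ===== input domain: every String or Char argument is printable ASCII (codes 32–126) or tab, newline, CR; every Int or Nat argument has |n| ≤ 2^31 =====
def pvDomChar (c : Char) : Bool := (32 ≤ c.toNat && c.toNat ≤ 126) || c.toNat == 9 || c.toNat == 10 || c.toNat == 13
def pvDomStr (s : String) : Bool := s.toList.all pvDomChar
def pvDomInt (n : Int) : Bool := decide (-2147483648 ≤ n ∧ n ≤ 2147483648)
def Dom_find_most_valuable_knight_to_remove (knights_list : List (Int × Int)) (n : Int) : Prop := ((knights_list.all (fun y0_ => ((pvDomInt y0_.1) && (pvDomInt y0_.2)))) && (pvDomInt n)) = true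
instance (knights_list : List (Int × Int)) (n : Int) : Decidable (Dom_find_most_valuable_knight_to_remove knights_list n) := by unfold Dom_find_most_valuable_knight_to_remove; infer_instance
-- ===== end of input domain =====

-- B records, during the same coverage-counting pass as A, the index of the last knight that
-- incremented each cell; a single sweep over the board then credits every uniquely-covered cell
-- to its sole owner, replacing A's per-knight neighbour re-scan (objective: alternative, same cost).
-- In both ports the Python zero-initialised 2D lists (and B's tally list) are modelled as
-- PySem.Dicts keyed by the resolved coordinates/indices; this is exact under Pre_, where every
-- index the programs use resolves inside the lists (after Python's negative-index wrap).

-- ===== PORT A =====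
-- Python's resolution of a (possibly negative) list index; exact for -n ≤ i < n (given by Pre_).
def pvWrap (n i : Int) : Int := if i < 0 then i + n else i

def pvMoves : List (Int × Int) :=
  [(1, 2), (2, 1), (2, -1), (-1, 2), (-1, -2), (-2, -1), (-2, 1), (1, -2)]

-- body of A's first loop: bump own cell, then bump each in-range knight-move neighbour
def pvStepA (n : Int) (board : PySem.Dict (Int × Int) Int) (k : Int × Int) :
    PySem.Dict (Int × Int) Int :=
  let board1 := board.modify (pvWrap n k.1, pvWrap n k.2) 0 (· + 1)
  pvMoves.foldl
    (fun b m =>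
      if 0 ≤ k.1 + m.1 ∧ k.1 + m.1 < n ∧ 0 ≤ k.2 + m.2 ∧ k.2 + m.2 < n then
        b.modify (k.1 + m.1, k.2 + m.2) 0 (· + 1)
      else b)
    board1

def pvBoardA (knights_list : List (Int × Int)) (n : Int) : PySem.Dict (Int × Int) Int :=
  knights_list.foldl (pvStepA n) PySem.Dict.empty

def find_most_valuable_knight_to_remove (knights_list : List (Int × Int)) (n : Int) : Int :=
  let board := pvBoardA knights_list n
  knights_list.foldl
    (fun max_cells_freed k =>
      let c0 : Int := if board.getD (pvWrap n k.1, pvWrap n k.2) 0 = 1 then 1 else 0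
      let cf : Int :=
        pvMoves.foldl
          (fun acc m =>
            if 0 ≤ k.1 + m.1 ∧ k.1 + m.1 < n ∧ 0 ≤ k.2 + m.2 ∧ k.2 + m.2 < n then
              (if board.getD (k.1 + m.1, k.2 + m.2) 0 = 1 then acc + 1 else acc)
            else acc)
          c0
      if max_cells_freed < cf then cf else max_cells_freed)
    0

-- ===== PORT B =====
-- body of B's first loop: same bumps as A, plus the owner grid updated to the knight's index
def pvStepB (n : Int)
    (s : PySem.Dict (Int × Int) Int × PySem.Dict (Int × Int) Int)
    (ik : Int × (Int × Int)) :
    PySem.Dict (Int × Int) Int × PySem.Dict (Int × Int) Int :=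
  let s1 := (s.1.modify (pvWrap n ik.2.1, pvWrap n ik.2.2) 0 (· + 1),
             s.2.insert (pvWrap n ik.2.1, pvWrap n ik.2.2) ik.1)
  pvMoves.foldl
    (fun t m =>
      if 0 ≤ ik.2.1 + m.1 ∧ ik.2.1 + m.1 < n ∧ 0 ≤ ik.2.2 + m.2 ∧ ik.2.2 + m.2 < n then
        (t.1.modify (ik.2.1 + m.1, ik.2.2 + m.2) 0 (· + 1),
         t.2.insert (ik.2.1 + m.1, ik.2.2 + m.2) ik.1)
      else t)
    s1

def pvStateB (knights_list : List (Int × Int)) (n : Int) :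
    PySem.Dict (Int × Int) Int × PySem.Dict (Int × Int) Int :=
  (PySem.List.enumerate knights_list).foldl (pvStepB n) (PySem.Dict.empty, PySem.Dict.empty)

def find_most_valuable_knight_to_remove_alt (knights_list : List (Int × Int)) (n : Int) : Int :=
  let s := pvStateB knights_list n
  -- sweep the board row by row; tally[owner] += 1 for each uniquely covered cell
  let tally : PySem.Dict Int Int :=
    (PySem.List.pyRange 0 n).foldl
      (fun t x =>
        (PySem.List.pyRange 0 n).foldl
          (fun t' y =>
            if s.1.getD (x, y) 0 = 1 then t'.modify (s.2.getD (x, y) (-1)) 0 (· + 1) else t')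
          t)
      PySem.Dict.empty
  -- max(tally, default=0)
  PySem.List.maxD
    ((PySem.List.pyRange 0 (knights_list.length : Int)).map (fun j => tally.getD j 0))
    (fun v => v) 0

-- ===== PRECONDITION & SPEC =====
-- Pre_ excludes exactly the inputs where Python A raises IndexError: a knight whose own
-- coordinates do not resolve into the n×n board (board[x][y] with x or y outside [-n, n)).
def Pre_find_most_valuable_knight_to_remove (knights_list : List (Int × Int)) (n : Int) : Prop :=
  ∀ k ∈ knights_list, -n ≤ k.1 ∧ k.1 < n ∧ -n ≤ k.2 ∧ k.2 < n
instance (knights_list : List (Int × Int)) (n : Int) : Decidable (Pre_find_most_valuable_knight_to_remove knights_list n) := by unfold Pre_find_most_valuable_knight_to_remove; infer_instance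

def pvWitness_find_most_valuable_knight_to_remove : (List (Int × Int)) × Int :=
  ([(0, 0), (2, 1), (-1, 3)], 4)

def Spec_find_most_valuable_knight_to_remove (knights_list : List (Int × Int)) (n : Int) (out : Int) : Prop := out = find_most_valuable_knight_to_remove_alt knights_list n
instance (knights_list : List (Int × Int)) (n : Int) (out : Int) : Decidable (Spec_find_most_valuable_knight_to_remove knights_list n out) := by unfold Spec_find_most_valuable_knight_to_remove; infer_instance

-- ===== CLAIM (what is proved, stated in full; the proofs are below) =====
def Claim_equal_find_most_valuable_knight_to_remove : Prop := ∀ (knights_list : List (Int × Int)) (n : Int), Dom_find_most_valuable_knight_to_remove knights_list n → Pre_find_most_valuable_knight_to_remove knights_list n → Spec_find_most_valuable_knight_to_remove knights_list n (find_most_valuable_knight_to_remove knights_list n)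

-- ===== LEMMAS AND PROOFS =====

-- the list of cells knight k touches: its own (wrap-resolved) square, then the in-range neighbours
def pvCover (n : Int) (k : Int × Int) : List (Int × Int) :=
  (pvWrap n k.1, pvWrap n k.2) ::
    (pvMoves.filter
        (fun m => decide (0 ≤ k.1 + m.1 ∧ k.1 + m.1 < n ∧ 0 ≤ k.2 + m.2 ∧ k.2 + m.2 < n))).map
      (fun m => (k.1 + m.1, k.2 + m.2))

-- total coverage count of a cell
def pvT (knights_list : List (Int × Int)) (n : Int) (c : Int × Int) : Nat :=
  (knights_list.flatMap (pvCover n)).count c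

def pvGrid (n : Int) : List (Int × Int) :=
  (PySem.List.pyRange 0 n).flatMap (fun x => (PySem.List.pyRange 0 n).map (fun y => (x, y)))

def pvLastOwner (n : Int) (l : List (Int × (Int × Int))) (c : Int × Int) (o : Int) : Int :=
  l.foldl (fun o ik => if c ∈ pvCover n ik.2 then ik.1 else o) o

-- per-knight freed count, phrased over the cover list
def pvF (knights_list : List (Int × Int)) (n : Int) (k : Int × Int) : Int :=
  ((pvCover n k).countP (fun c => decide (pvT knights_list n c = 1)) : Int)

theorem foldl_bump_guard {α : Type} (l : List α) (P : α → Prop) [DecidablePred P]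
    (g : α → (Int × Int)) (b : PySem.Dict (Int × Int) Int) (c : Int × Int) :
    ((l.foldl (fun bb e => if P e then bb.modify (g e) 0 (· + 1) else bb) b).getD c 0)
      = b.getD c 0 + (((l.filter (fun e => decide (P e))).map g).count c : Int) := by
  induction l generalizing b with
  | nil => simp
  | cons a t ih =>
      simp only [List.foldl_cons]
      rw [ih]
      by_cases hP : P a
      · simp only [hP, if_pos, List.filter_cons, decide_eq_true_eq, List.map_cons,
          List.count_cons, beq_iff_eq]
        rw [PySem.Dict.getD_modify]
        by_cases h : c = g a
        · rw [if_pos h, if_pos h.symm, h]; push_cast; omega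
        · rw [if_neg h, if_neg (fun hh => h hh.symm)]; push_cast; omega
      · simp only [List.filter_cons, decide_eq_true_eq, hP, ite_false]

theorem stepA_apply (n : Int) (b : PySem.Dict (Int × Int) Int) (k : Int × Int) (c : Int × Int) :
    (pvStepA n b k).getD c 0 = b.getD c 0 + ((pvCover n k).count c : Int) := by
  have h := foldl_bump_guard pvMoves
      (fun m => 0 ≤ k.1 + m.1 ∧ k.1 + m.1 < n ∧ 0 ≤ k.2 + m.2 ∧ k.2 + m.2 < n)
      (fun m => (k.1 + m.1, k.2 + m.2))
      (b.modify (pvWrap n k.1, pvWrap n k.2) 0 (· + 1)) c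
  refine Eq.trans h ?_
  rw [PySem.Dict.getD_modify]
  simp only [pvCover, List.count_cons, beq_iff_eq]
  by_cases hc : c = (pvWrap n k.1, pvWrap n k.2)
  · rw [if_pos hc, if_pos hc.symm, hc]; push_cast; omega
  · rw [if_neg hc, if_neg (fun hh => hc hh.symm)]; push_cast; omega

theorem foldl_stepA_count (kl : List (Int × Int)) (n : Int) (b : PySem.Dict (Int × Int) Int)
    (c : Int × Int) :
    (kl.foldl (pvStepA n) b).getD c 0 = b.getD c 0 + (pvT kl n c : Int) := by
  induction kl generalizing b with
  | nil => simp [pvT]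
  | cons k t ih =>
      simp only [List.foldl_cons]
      rw [ih, stepA_apply]
      simp only [pvT, List.flatMap_cons, List.count_append]
      push_cast
      ring

theorem boardA_eq_T (kl : List (Int × Int)) (n : Int) (c : Int × Int) :
    (pvBoardA kl n).getD c 0 = (pvT kl n c : Int) := by
  simpa using foldl_stepA_count kl n PySem.Dict.empty c

-- the paired fold of B, projected on each component
theorem foldl_pair_fst {α : Type} (l : List α) (P : α → Prop)
    [DecidablePred P] (g : α → (Int × Int)) (i : Int)
    (t : PySem.Dict (Int × Int) Int × PySem.Dict (Int × Int) Int) :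
    (l.foldl
        (fun (st : PySem.Dict (Int × Int) Int × PySem.Dict (Int × Int) Int) e =>
          if P e then (st.1.modify (g e) 0 (· + 1), st.2.insert (g e) i) else st) t).1
      = l.foldl
          (fun b e => if P e then b.modify (g e) 0 (· + 1) else b) t.1 := by
  induction l generalizing t with
  | nil => rfl
  | cons a s ih =>
      simp only [List.foldl_cons]
      rw [ih]
      by_cases hP : P a
      · simp only [hP, if_pos]
      · simp only [hP, ite_false]

theorem foldl_pair_snd {α : Type} (l : List α) (P : α → Prop)
    [DecidablePred P] (g : α → (Int × Int)) (i : Int)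
    (t : PySem.Dict (Int × Int) Int × PySem.Dict (Int × Int) Int) (c : Int × Int) :
    ((l.foldl
        (fun (st : PySem.Dict (Int × Int) Int × PySem.Dict (Int × Int) Int) e =>
          if P e then (st.1.modify (g e) 0 (· + 1), st.2.insert (g e) i) else st) t).2).getD c (-1)
      = if c ∈ (l.filter (fun e => decide (P e))).map g then i else t.2.getD c (-1) := by
  induction l generalizing t with
  | nil => simp
  | cons a s ih =>
      simp only [List.foldl_cons]
      rw [ih]
      by_cases hP : P a
      · simp only [hP, if_pos, List.filter_cons, decide_eq_true_eq, List.map_cons,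
          List.mem_cons]
        rw [PySem.Dict.getD_insert]
        split_ifs with h1 h2 h3 <;> first | rfl | tauto
      · simp only [List.filter_cons, decide_eq_true_eq, hP, ite_false]

theorem stepB_fst (n : Int)
    (s : PySem.Dict (Int × Int) Int × PySem.Dict (Int × Int) Int)
    (ik : Int × (Int × Int)) : (pvStepB n s ik).1 = pvStepA n s.1 ik.2 := by
  exact foldl_pair_fst pvMoves
    (fun m => 0 ≤ ik.2.1 + m.1 ∧ ik.2.1 + m.1 < n ∧ 0 ≤ ik.2.2 + m.2 ∧ ik.2.2 + m.2 < n)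
    (fun m => (ik.2.1 + m.1, ik.2.2 + m.2)) ik.1 _

theorem stateB_fst (kl : List (Int × Int)) (n : Int)
    (s : PySem.Dict (Int × Int) Int × PySem.Dict (Int × Int) Int) (st : Int) :
    ((PySem.List.enumerate kl st).foldl (pvStepB n) s).1 = kl.foldl (pvStepA n) s.1 := by
  induction kl generalizing s st with
  | nil => simp [PySem.List.enumerate]
  | cons k t ih =>
      rw [PySem.List.enumerate_cons]
      simp only [List.foldl_cons]
      rw [ih _ (st + 1), stepB_fst]

theorem stateB_count (kl : List (Int × Int)) (n : Int) (c : Int × Int) :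
    (pvStateB kl n).1.getD c 0 = (pvT kl n c : Int) := by
  unfold pvStateB
  rw [stateB_fst]
  simpa using foldl_stepA_count kl n PySem.Dict.empty c

theorem stepB_snd (n : Int)
    (s : PySem.Dict (Int × Int) Int × PySem.Dict (Int × Int) Int)
    (ik : Int × (Int × Int)) (c : Int × Int) :
    (pvStepB n s ik).2.getD c (-1) = if c ∈ pvCover n ik.2 then ik.1 else s.2.getD c (-1) := by
  have h := foldl_pair_snd pvMoves
    (fun m => 0 ≤ ik.2.1 + m.1 ∧ ik.2.1 + m.1 < n ∧ 0 ≤ ik.2.2 + m.2 ∧ ik.2.2 + m.2 < n)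
    (fun m => (ik.2.1 + m.1, ik.2.2 + m.2)) ik.1
    (s.1.modify (pvWrap n ik.2.1, pvWrap n ik.2.2) 0 (· + 1),
     s.2.insert (pvWrap n ik.2.1, pvWrap n ik.2.2) ik.1) c
  refine Eq.trans h ?_
  simp only [pvCover, List.mem_cons]
  rw [PySem.Dict.getD_insert]
  split_ifs with h1 h2 h3 <;> first | rfl | tauto

theorem stateB_snd_aux (kl : List (Int × Int)) (n : Int)
    (s : PySem.Dict (Int × Int) Int × PySem.Dict (Int × Int) Int) (st : Int) (c : Int × Int) :
    ((PySem.List.enumerate kl st).foldl (pvStepB n) s).2.getD c (-1)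
      = pvLastOwner n (PySem.List.enumerate kl st) c (s.2.getD c (-1)) := by
  induction kl generalizing s st with
  | nil => simp [PySem.List.enumerate, pvLastOwner]
  | cons k t ih =>
      rw [PySem.List.enumerate_cons]
      simp only [List.foldl_cons, pvLastOwner]
      rw [ih _ (st + 1)]
      simp [pvLastOwner, stepB_snd]

theorem stateB_owner (kl : List (Int × Int)) (n : Int) (c : Int × Int) :
    (pvStateB kl n).2.getD c (-1) = pvLastOwner n (PySem.List.enumerate kl) c (-1) := by
  unfold pvStateB
  rw [stateB_snd_aux]
  simp

theorem lastOwner_init_or_mem (n : Int) (l : List (Int × (Int × Int))) (c : Int × Int)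
    (o : Int) :
    pvLastOwner n l c o = o ∨
      ∃ p ∈ l, c ∈ pvCover n p.2 ∧ p.1 = pvLastOwner n l c o := by
  induction l generalizing o with
  | nil => left; rfl
  | cons p t ih =>
      simp only [pvLastOwner, List.foldl_cons]
      by_cases hp : c ∈ pvCover n p.2 <;> simp only [hp, if_pos, ite_false]
      · rcases ih p.1 with h | ⟨q, hq, hc, he⟩
        · right; exact ⟨p, List.mem_cons_self, hp, h.symm⟩
        · right; exact ⟨q, List.mem_cons_of_mem _ hq, hc, he⟩
      · rcases ih o with h | ⟨q, hq, hc, he⟩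
        · left; exact h
        · right; exact ⟨q, List.mem_cons_of_mem _ hq, hc, he⟩

-- a Nat-list with two distinct positive entries sums to at least 2
theorem two_le_sum (l : List Nat) (i j : Nat) (hij : i ≠ j) (hi : i < l.length)
    (hj : j < l.length) (h1 : 1 ≤ l[i]) (h2 : 1 ≤ l[j]) : 2 ≤ l.sum := by
  induction l generalizing i j with
  | nil => simp at hi
  | cons a t ih =>
      cases i with
      | zero =>
          cases j with
          | zero => exact absurd rfl hij
          | succ j' =>
              simp only [List.getElem_cons_zero] at h1
              simp only [List.getElem_cons_succ] at h2
              have hj' : j' < t.length := by simpa using hj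
              have : t[j'] ≤ t.sum := List.le_sum_of_mem (List.getElem_mem hj')
              simp only [List.sum_cons]
              omega
      | succ i' =>
          cases j with
          | zero =>
              simp only [List.getElem_cons_zero] at h2
              simp only [List.getElem_cons_succ] at h1
              have hi' : i' < t.length := by simpa using hi
              have : t[i'] ≤ t.sum := List.le_sum_of_mem (List.getElem_mem hi')
              simp only [List.sum_cons]
              omega
          | succ j' =>
              simp only [List.getElem_cons_succ] at h1 h2
              have := ih i' j' (by omega) (by simpa using hi) (by simpa using hj) h1 h2
              simp only [List.sum_cons]
              omega

theorem count_cover_le_T (kl : List (Int × Int)) (n : Int) (c : Int × Int) (i : Nat)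
    (hi : i < kl.length) : (pvCover n kl[i]).count c ≤ pvT kl n c := by
  unfold pvT
  rw [List.count_flatMap]
  have hmem : (pvCover n kl[i]).count c ∈ kl.map (List.count c ∘ pvCover n) := by
    simp only [List.mem_map]
    exact ⟨kl[i], List.getElem_mem _, rfl⟩
  exact List.le_sum_of_mem hmem

-- if c is covered exactly once overall and knight i covers it, no other index covers it
theorem unique_coverer (kl : List (Int × Int)) (n : Int) (c : Int × Int) (i : Nat)
    (hi : i < kl.length) (hT : pvT kl n c = 1) (hc : c ∈ pvCover n kl[i])
    (j : Nat) (hj : j < kl.length) (hcj : c ∈ pvCover n kl[j]) : j = i := by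
  by_contra hne
  have h1 : 1 ≤ (kl.map (List.count c ∘ pvCover n))[i]'(by simpa using hi) := by
    simpa using List.count_pos_iff.mpr hc
  have h2 : 1 ≤ (kl.map (List.count c ∘ pvCover n))[j]'(by simpa using hj) := by
    simpa using List.count_pos_iff.mpr hcj
  have := two_le_sum (kl.map (List.count c ∘ pvCover n)) i j (fun h => hne (h.symm ▸ rfl))
    (by simpa using hi) (by simpa using hj) h1 h2
  unfold pvT at hT
  rw [List.count_flatMap] at hT
  omega

theorem lastOwner_mem_covered (n : Int) (l : List (Int × (Int × Int))) (c : Int × Int)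
    (o : Int) (h : ∃ p ∈ l, c ∈ pvCover n p.2) :
    ∃ p ∈ l, c ∈ pvCover n p.2 ∧ pvLastOwner n l c o = p.1 := by
  induction l generalizing o with
  | nil => simp at h
  | cons p t ih =>
      by_cases hp : c ∈ pvCover n p.2
      · simp only [pvLastOwner, List.foldl_cons, hp, if_pos]
        rcases lastOwner_init_or_mem n t c p.1 with he | ⟨q, hq, hcq, heq⟩
        · exact ⟨p, List.mem_cons_self, hp, he⟩
        · exact ⟨q, List.mem_cons_of_mem _ hq, hcq, heq.symm ▸ rfl⟩
      · simp only [pvLastOwner, List.foldl_cons, hp, ite_false]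
        have h' : ∃ q ∈ t, c ∈ pvCover n q.2 := by
          rcases h with ⟨q, hq, hcq⟩
          rcases List.mem_cons.mp hq with rfl | hq'
          · exact absurd hcq hp
          · exact ⟨q, hq', hcq⟩
        rcases ih o h' with ⟨q, hq, hcq, heq⟩
        exact ⟨q, List.mem_cons_of_mem _ hq, hcq, heq⟩

theorem owner_forward (kl : List (Int × Int)) (n : Int) (c : Int × Int) (i : Nat)
    (hi : i < kl.length) (hT : pvT kl n c = 1) (hc : c ∈ pvCover n kl[i]) :
    pvLastOwner n (PySem.List.enumerate kl) c (-1) = (i : Int) := by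
  have hex : ∃ p ∈ PySem.List.enumerate kl (0 : Int), c ∈ pvCover n p.2 := by
    refine ⟨((i : Int), kl[i]), ?_, hc⟩
    rw [PySem.List.mem_enumerate_iff]
    exact ⟨i, hi, by simp⟩
  rcases lastOwner_mem_covered n (PySem.List.enumerate kl) c (-1) hex with ⟨p, hp, hcp, he⟩
  rw [PySem.List.mem_enumerate_iff] at hp
  obtain ⟨j, hj, rfl⟩ := hp
  have := unique_coverer kl n c i hi hT hc j hj hcp
  simp [he, this]

theorem owner_backward (kl : List (Int × Int)) (n : Int) (c : Int × Int) (i : Nat)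
    (hi : i < kl.length)
    (h : pvLastOwner n (PySem.List.enumerate kl) c (-1) = (i : Int)) :
    c ∈ pvCover n kl[i] := by
  rcases lastOwner_init_or_mem n (PySem.List.enumerate kl) c (-1) with h0 | ⟨p, hp, hcp, he⟩
  · rw [h0] at h; omega
  · rw [PySem.List.mem_enumerate_iff] at hp
    obtain ⟨j, hj, rfl⟩ := hp
    rw [h] at he
    have : j = i := by omega
    subst this
    exact hcp

theorem mem_grid (n : Int) (c : Int × Int) :
    c ∈ pvGrid n ↔ 0 ≤ c.1 ∧ c.1 < n ∧ 0 ≤ c.2 ∧ c.2 < n := by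
  unfold pvGrid
  simp only [List.mem_flatMap, List.mem_map, PySem.List.mem_pyRange_one]
  constructor
  · rintro ⟨x, ⟨hx1, hx2⟩, y, ⟨hy1, hy2⟩, rfl⟩
    exact ⟨hx1, hx2, hy1, hy2⟩
  · rintro ⟨h1, h2, h3, h4⟩
    exact ⟨c.1, ⟨h1, h2⟩, c.2, ⟨h3, h4⟩, rfl⟩

theorem nodup_grid (n : Int) : (pvGrid n).Nodup := by
  unfold pvGrid
  apply List.nodup_flatMap.mpr
  constructor
  · intro x _
    exact (PySem.List.nodup_pyRange_one 0 n).map (fun a b h => by simpa using h)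
  · apply List.Pairwise.imp _ ((PySem.List.nodup_pyRange_one 0 n))
    intro a b hab
    simp only [Function.onFun, List.disjoint_left, List.mem_map]
    rintro p ⟨y, _, rfl⟩ ⟨y', _, hp⟩
    have hba : b = a := by simpa using congrArg Prod.fst hp
    exact hab hba.symm

theorem cover_subset_grid (n : Int) (k : Int × Int)
    (hk : -n ≤ k.1 ∧ k.1 < n ∧ -n ≤ k.2 ∧ k.2 < n) (c : Int × Int)
    (hc : c ∈ pvCover n k) : c ∈ pvGrid n := by
  rw [mem_grid]
  unfold pvCover at hc
  rcases List.mem_cons.mp hc with rfl | h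
  · unfold pvWrap
    constructor
    · split_ifs <;> omega
    constructor
    · split_ifs <;> omega
    constructor
    · split_ifs <;> omega
    · split_ifs <;> omega
  · obtain ⟨m, hm, rfl⟩ := List.mem_map.mp h
    have := List.of_mem_filter hm
    simp only [decide_eq_true_eq] at this
    exact ⟨this.1, this.2.1, this.2.2.1, this.2.2.2⟩

-- cells satisfying "covered exactly once" occur at most once in any single cover list
theorem nodup_cover_filter (kl : List (Int × Int)) (n : Int) (i : Nat) (hi : i < kl.length) :
    ((pvCover n kl[i]).filter (fun c => decide (pvT kl n c = 1))).Nodup := by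
  rw [List.nodup_iff_count_le_one]
  intro c
  by_cases hc : c ∈ (pvCover n kl[i]).filter (fun c => decide (pvT kl n c = 1))
  · have hT : pvT kl n c = 1 := by
      have := List.of_mem_filter hc
      simpa using this
    calc List.count c ((pvCover n kl[i]).filter (fun c => decide (pvT kl n c = 1)))
        ≤ List.count c (pvCover n kl[i]) := List.Sublist.count_le c (List.filter_sublist)
      _ ≤ pvT kl n c := count_cover_le_T kl n c i hi
      _ = 1 := hT
  · simp [List.count_eq_zero_of_not_mem hc]

-- the per-knight equality: A's freed count for knight i = B's tally for owner i
theorem per_knight (kl : List (Int × Int)) (n : Int)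
    (hpre : ∀ k ∈ kl, -n ≤ k.1 ∧ k.1 < n ∧ -n ≤ k.2 ∧ k.2 < n)
    (i : Nat) (hi : i < kl.length) :
    (pvCover n kl[i]).countP (fun c => decide (pvT kl n c = 1))
      = (pvGrid n).countP
          (fun c => decide (pvT kl n c = 1 ∧
            pvLastOwner n (PySem.List.enumerate kl) c (-1) = (i : Int))) := by
  rw [List.countP_eq_length_filter, List.countP_eq_length_filter]
  apply List.Perm.length_eq
  rw [List.perm_ext_iff_of_nodup (nodup_cover_filter kl n i hi)
        ((nodup_grid n).filter _)]
  intro c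
  simp only [List.mem_filter, decide_eq_true_eq]
  constructor
  · rintro ⟨hmem, hT⟩
    refine ⟨cover_subset_grid n kl[i] (hpre kl[i] (List.getElem_mem _)) c hmem, hT,
      owner_forward kl n c i hi hT hmem⟩
  · rintro ⟨_, hT, how⟩
    exact ⟨owner_backward kl n c i hi how, hT⟩

-- A's per-knight loop body computes the countP over the cover list
theorem foldl_guard_count {α β : Type} (l : List α) (P : α → Prop) [DecidablePred P]
    (g : α → β) (q : β → Prop) [DecidablePred q] (a : Int) :
    l.foldl
        (fun acc e => if P e then (if q (g e) then acc + 1 else acc) else acc) a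
      = a + (((l.filter (fun e => decide (P e))).map g).countP (fun c => decide (q c)) : Int) := by
  induction l generalizing a with
  | nil => simp
  | cons e t ih =>
      simp only [List.foldl_cons]
      by_cases hP : P e
      · simp only [hP, if_pos, List.filter_cons, decide_eq_true_eq, List.map_cons,
          List.countP_cons]
        by_cases hq : q (g e)
        · rw [if_pos hq, ih, if_pos (by simpa using hq)]; push_cast; omega
        · rw [if_neg hq, ih, if_neg (by simpa using hq)]; push_cast; omega
      · rw [if_neg hP, ih]
        simp only [List.filter_cons, decide_eq_true_eq, hP, ite_false]

theorem freedA_eq (kl : List (Int × Int)) (n : Int) (k : Int × Int) :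
    (pvMoves.foldl
        (fun acc m =>
          if 0 ≤ k.1 + m.1 ∧ k.1 + m.1 < n ∧ 0 ≤ k.2 + m.2 ∧ k.2 + m.2 < n then
            (if (pvBoardA kl n).getD (k.1 + m.1, k.2 + m.2) 0 = 1 then acc + 1 else acc)
          else acc)
        (if (pvBoardA kl n).getD (pvWrap n k.1, pvWrap n k.2) 0 = 1 then 1 else 0))
      = pvF kl n k := by
  have h := foldl_guard_count pvMoves
      (fun m => 0 ≤ k.1 + m.1 ∧ k.1 + m.1 < n ∧ 0 ≤ k.2 + m.2 ∧ k.2 + m.2 < n)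
      (fun m => (k.1 + m.1, k.2 + m.2)) (fun c => (pvBoardA kl n).getD c 0 = 1)
      (if (pvBoardA kl n).getD (pvWrap n k.1, pvWrap n k.2) 0 = 1 then 1 else 0)
  refine Eq.trans h ?_
  have hpred : ∀ c, (decide ((pvBoardA kl n).getD c 0 = 1)) = (decide (pvT kl n c = 1)) := by
    intro c
    rw [boardA_eq_T]
    by_cases h : pvT kl n c = 1 <;> simp [h] <;> omega
  unfold pvF pvCover
  simp only [List.countP_cons, hpred]
  rw [boardA_eq_T]
  by_cases h : pvT kl n (pvWrap n k.1, pvWrap n k.2) = 1 <;>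
    first
      | (simp [h]; push_cast; omega)
      | (simp [h]; omega)
      | simp [h]

-- B's sweep computes the per-owner tally as a countP over the grid
theorem foldl_tally (l : List (Int × Int)) (cond : (Int × Int) → Prop)
    [DecidablePred cond] (ownf : (Int × Int) → Int) (t0 : PySem.Dict Int Int) (j : Int) :
    (l.foldl
        (fun t c => if cond c then t.modify (ownf c) 0 (· + 1) else t)
        t0).getD j 0
      = t0.getD j 0 + (l.countP (fun c => decide (cond c ∧ ownf c = j)) : Int) := by
  induction l generalizing t0 with
  | nil => simp
  | cons c t ih =>
      simp only [List.foldl_cons, List.countP_cons]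
      by_cases h1 : cond c
      · rw [if_pos h1, ih, PySem.Dict.getD_modify]
        by_cases h2 : ownf c = j
        · rw [if_pos (h2.symm ▸ rfl), if_pos (by simp [h1, h2]), h2]
          push_cast; omega
        · rw [if_neg (fun hh => h2 hh.symm), if_neg (by simp [h2])]
          push_cast; omega
      · rw [if_neg h1, ih, if_neg (by simp [h1])]
        push_cast; omega

theorem sweep_eq (kl : List (Int × Int)) (n : Int) (j : Int) :
    ((PySem.List.pyRange 0 n).foldl
        (fun t x =>
          (PySem.List.pyRange 0 n).foldl
            (fun t' y =>
              if (pvStateB kl n).1.getD (x, y) 0 = 1 then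
                t'.modify ((pvStateB kl n).2.getD (x, y) (-1)) 0 (· + 1)
              else t')
            t)
        PySem.Dict.empty).getD j 0
      = ((pvGrid n).countP
          (fun c => decide (pvT kl n c = 1 ∧
            pvLastOwner n (PySem.List.enumerate kl) c (-1) = j)) : Int) := by
  have hrw : ∀ (t : PySem.Dict Int Int),
      (PySem.List.pyRange 0 n).foldl
        (fun t x =>
          (PySem.List.pyRange 0 n).foldl
            (fun t' y =>
              if (pvStateB kl n).1.getD (x, y) 0 = 1 then
                t'.modify ((pvStateB kl n).2.getD (x, y) (-1)) 0 (· + 1)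
              else t')
            t)
        t
      = (pvGrid n).foldl
          (fun t' c =>
            if (pvStateB kl n).1.getD c 0 = 1 then
              t'.modify ((pvStateB kl n).2.getD c (-1)) 0 (· + 1)
            else t')
          t := by
    intro t
    unfold pvGrid
    rw [List.flatMap_def, List.foldl_flatten, List.foldl_map]
    congr 1
    funext t' x
    rw [List.foldl_map]
  rw [hrw]
  rw [foldl_tally (pvGrid n)
        (fun c => (pvStateB kl n).1.getD c 0 = 1)
        (fun c => (pvStateB kl n).2.getD c (-1)) PySem.Dict.empty j]
  simp only [PySem.Dict.getD_empty, zero_add]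
  congr 1
  apply List.countP_congr
  intro c _
  rw [stateB_count, stateB_owner]
  by_cases h1 : pvT kl n c = 1 <;>
    by_cases h2 : pvLastOwner n (PySem.List.enumerate kl) c (-1) = j <;>
      first
        | (simp [h1, h2]; omega)
        | simp [h1, h2]

theorem if_lt_eq_max (a b : Int) : (if a < b then b else a) = max a b := by
  simp only [max_def]; split_ifs <;> omega

theorem foldl_runmax_eq_maxD (xs : List Int) (hnn : ∀ v ∈ xs, 0 ≤ v) :
    xs.foldl (fun mx v => if mx < v then v else mx) 0
      = PySem.List.maxD xs (fun v => v) 0 := by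
  cases xs with
  | nil => simp [PySem.List.maxD, PySem.List.max?]
  | cons x t =>
      rw [PySem.List.maxD, PySem.List.max?_id_cons]
      simp only [List.foldl_cons, Option.getD_some]
      have h0 : (if (0 : Int) < x then x else 0) = x := by
        have := hnn x (List.mem_cons_self); split_ifs <;> omega
      rw [h0]
      apply PySem.List.foldl_congr_mem
      intro acc v _
      exact if_lt_eq_max acc v

theorem map_getElem_eq_map (kl : List (Int × Int)) (F : (Int × Int) → Int) :
    (List.range kl.length).map (fun i => F (kl.getD i (0, 0))) = kl.map F := by
  apply List.ext_getElem (by simp)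
  intro i h1 h2
  simp [List.getD_eq_getElem?_getD, List.getElem?_eq_getElem (by simpa using h2)]

theorem pvF_nonneg (kl : List (Int × Int)) (n : Int) (k : Int × Int) : 0 ≤ pvF kl n k := by
  unfold pvF; positivity

-- ===== VERDICT (by name: the statement is the Claim_ definition above) =====
theorem find_most_valuable_knight_to_remove_spec : Claim_equal_find_most_valuable_knight_to_remove := by
  unfold Claim_equal_find_most_valuable_knight_to_remove
  intro kl n _ hpre
  unfold Spec_find_most_valuable_knight_to_remove
  unfold find_most_valuable_knight_to_remove find_most_valuable_knight_to_remove_alt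
  simp only []
  -- A's second loop computes the running max of pvF
  have hA : kl.foldl
      (fun max_cells_freed k =>
        let c0 : Int := if (pvBoardA kl n).getD (pvWrap n k.1, pvWrap n k.2) 0 = 1 then 1 else 0
        let cf : Int :=
          pvMoves.foldl
            (fun acc m =>
              if 0 ≤ k.1 + m.1 ∧ k.1 + m.1 < n ∧ 0 ≤ k.2 + m.2 ∧ k.2 + m.2 < n then
                (if (pvBoardA kl n).getD (k.1 + m.1, k.2 + m.2) 0 = 1 then acc + 1 else acc)
              else acc)
            c0
        if max_cells_freed < cf then cf else max_cells_freed) 0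
      = kl.foldl (fun mx k => if mx < pvF kl n k then pvF kl n k else mx) 0 := by
    apply PySem.List.foldl_congr_mem
    intro acc k _
    simp only []
    rw [freedA_eq]
  rw [hA]
  -- B's tally list is the list of pvF values, knight by knight
  have hmap : (PySem.List.pyRange 0 (kl.length : Int)).map
        (fun j =>
          ((PySem.List.pyRange 0 n).foldl
            (fun t x =>
              (PySem.List.pyRange 0 n).foldl
                (fun t' y =>
                  if (pvStateB kl n).1.getD (x, y) 0 = 1 then
                    t'.modify ((pvStateB kl n).2.getD (x, y) (-1)) 0 (· + 1)
                  else t')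
                t)
            PySem.Dict.empty).getD j 0)
      = kl.map (pvF kl n) := by
    rw [PySem.List.pyRange_zero_natCast, List.map_map]
    rw [← map_getElem_eq_map kl (pvF kl n)]
    apply List.ext_getElem (by simp)
    intro i h1 h2
    simp only [List.getElem_map, List.getElem_range, Function.comp_apply]
    rw [sweep_eq]
    have hi : i < kl.length := by simpa using h2
    have := per_knight kl n hpre i hi
    rw [List.getD_eq_getElem?_getD, List.getElem?_eq_getElem hi]
    simp only [Option.getD_some, pvF]
    rw [this]
  rw [hmap]
  rw [← foldl_runmax_eq_maxD (kl.map (pvF kl n))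
        (by intro v hv; obtain ⟨k, _, rfl⟩ := List.mem_map.mp hv; exact pvF_nonneg kl n k)]
  rw [List.foldl_map]
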